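-- pv_equiv track=rewrite | github.com/recursivelabsai/evo | evoOps/prompting/prompt_builder.py | _format_residue
-- ===== SOURCE A (Python) =====
-- from typing import Dict, List, Any, Optional, Union
--
-- def _format_residue(residue: List[Dict[str, Any]]) -> str:
--     """
--     Format residue patterns for inclusion in the prompt.
--
--     Args:
--         residue: List of residue pattern dictionaries
--
--     Returns:
--         A formatted string representing the residue patterns
--     """
--     if not residue:
--         return ""
--
--     # Group residue by type
--     residue_by_type = {}
--     for item in residue:
--         residue_type = item.get("type", "unknown")
--         if residue_type not in residue_by_type:
--             residue_by_type[residue_type] = []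
--         residue_by_type[residue_type].append(item)
--
--     # Format each type of residue
--     formatted_residue = []
--     for residue_type, items in residue_by_type.items():
--         formatted_residue.append(f"### {residue_type.title()} Patterns")
--         for item in items:
--             pattern = item.get("pattern", "")
--             value = item.get("potential_value", "")
--             formatted_residue.append(f"- **Pattern**: {pattern}")
--             if value:
--                 formatted_residue.append(f"  **Potential Value**: {value}")
--         formatted_residue.append("")
--
--     return "\n".join(formatted_residue)
-- ===== SOURCE B (Python) =====
-- def _format_residue(residue):
--     # Peel off one type-group at a time from the front, building each group's
--     # block as a single string, then join blocks with blank lines.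
--     def fmt(item):
--         s = f"- **Pattern**: {item.get('pattern', '')}"
--         v = item.get("potential_value", "")
--         if v:
--             s += f"\n  **Potential Value**: {v}"
--         return s
--
--     if not residue:
--         return ""
--     blocks = []
--     rest = residue
--     while rest:
--         t = rest[0].get("type", "unknown")
--         mine = [i for i in rest if i.get("type", "unknown") == t]
--         blocks.append("\n".join([f"### {t.title()} Patterns"] + [fmt(i) for i in mine]))
--         rest = [i for i in rest if i.get("type", "unknown") != t]
--     return "\n\n".join(blocks) + "\n"
-- ===== Notes on version B (the rewrite author's own statement) =====
-- stated objective: alternative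
-- what changed: Replaces the dict-of-lists grouping plus final line-list join by a peel-off loop that repeatedly takes the first remaining item's type, builds that group's whole block as one string, removes that group from the working list, and joins block strings with blank lines.
import Mathlib
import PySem

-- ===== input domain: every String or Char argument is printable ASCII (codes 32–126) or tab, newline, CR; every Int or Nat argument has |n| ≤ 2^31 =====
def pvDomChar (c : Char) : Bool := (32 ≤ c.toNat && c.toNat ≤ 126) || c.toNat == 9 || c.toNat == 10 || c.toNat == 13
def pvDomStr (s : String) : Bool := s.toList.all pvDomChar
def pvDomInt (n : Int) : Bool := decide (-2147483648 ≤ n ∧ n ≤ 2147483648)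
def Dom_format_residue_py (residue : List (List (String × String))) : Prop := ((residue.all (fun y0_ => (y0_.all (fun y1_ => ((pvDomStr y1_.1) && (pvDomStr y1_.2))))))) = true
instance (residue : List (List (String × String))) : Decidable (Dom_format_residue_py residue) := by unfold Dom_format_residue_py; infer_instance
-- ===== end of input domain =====

-- B replaces A's dict-of-lists grouping (and final join over a flat line list) by a
-- peel-off loop: repeatedly take the first remaining item's type, render that whole
-- group as one block string, drop its items, and join blocks with blank lines
-- (objective: alternative, same output).

-- shared helpers: both Pythons call item.get(k, dflt) and str.title() identically.
-- item.get(k, dflt) on the association-list encoding of a dict (first match).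
def pvGet (item : List (String × String)) (k dflt : String) : String :=
  ((item.find? (fun p => p.1 == k)).map (·.2)).getD dflt

def pvKey (item : List (String × String)) : String := pvGet item "type" "unknown"

-- str.title(), hand-ported (exact on the ASCII domain, where cased = isalpha):
-- a letter is uppercased after a non-letter and lowercased after a letter.
def pvTitleAux : Bool → List Char → List Char
  | _, [] => []
  | prev, c :: cs =>
    if PySem.Chars.isalpha c then
      (if prev then PySem.Chars.lowerChar c else PySem.Chars.upperChar c) :: pvTitleAux true cs
    else c :: pvTitleAux false cs

def pvTitle (s : String) : String := String.ofList (pvTitleAux false s.toList)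

-- ===== PORT A =====
-- the inner loop body of A (pattern line + optional value line appended to the list)
def pvEmit (acc : List String) (item : List (String × String)) : List String :=
  let pat := pvGet item "pattern" ""
  let v := pvGet item "potential_value" ""
  let acc := acc ++ ["- **Pattern**: " ++ pat]
  if v ≠ "" then acc ++ ["  **Potential Value**: " ++ v] else acc

def format_residue_py (residue : List (List (String × String))) : String :=
  if residue = [] then "" else
    let grouped := residue.foldl
      (fun (d : PySem.Dict String (List (List (String × String)))) item =>
        let t := pvKey item
        let d := if d.contains t then d else d.insert t []
        d.modify t [] (fun l => l ++ [item]))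
      PySem.Dict.empty
    let lines := grouped.items.foldl
      (fun (acc : List String) p =>
        let acc := acc ++ ["### " ++ pvTitle p.1 ++ " Patterns"]
        let acc := p.2.foldl pvEmit acc
        acc ++ [""]) []
    PySem.Str.join "\n" lines

-- ===== PORT B =====
-- B's local fmt(item): one string per item (value line glued on with '\n')
def pvFmt (item : List (String × String)) : String :=
  let s := "- **Pattern**: " ++ pvGet item "pattern" ""
  let v := pvGet item "potential_value" ""
  if v ≠ "" then s ++ ("\n  **Potential Value**: " ++ v) else s

-- B's while loop: peel the first remaining type off the working list per round
def pvBlocks : List (List (String × String)) → List String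
  | [] => []
  | x :: xs =>
    let t := pvKey x
    let mine := (x :: xs).filter (fun i => pvKey i == t)
    let rest := (x :: xs).filter (fun i => pvKey i != t)
    PySem.Str.join "\n" (("### " ++ pvTitle t ++ " Patterns") :: mine.map pvFmt)
      :: pvBlocks rest
  termination_by l => l.length
  decreasing_by
    simp only [List.filter_cons, bne_self_eq_false, List.length_cons]
    exact Nat.lt_succ_of_le (List.length_filter_le _ _)

def format_residue_py_alt (residue : List (List (String × String))) : String :=
  if residue = [] then "" else
    PySem.Str.join "\n\n" (pvBlocks residue) ++ "\n"

-- ===== PRECONDITION & SPEC =====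
def Spec_format_residue_py (residue : List (List (String × String))) (out : String) : Prop := out = format_residue_py_alt residue
instance (residue : List (List (String × String))) (out : String) : Decidable (Spec_format_residue_py residue out) := by unfold Spec_format_residue_py; infer_instance

-- ===== CLAIM (what is proved, stated in full; the proofs are below) =====
def Claim_equal_format_residue_py : Prop := ∀ (residue : List (List (String × String))), Dom_format_residue_py residue → Spec_format_residue_py residue (format_residue_py residue)

-- ===== LEMMAS AND PROOFS =====

-- proof-only abbreviations
def pvHeader (t : String) : String := "### " ++ pvTitle t ++ " Patterns"

def pvItemLines (item : List (String × String)) : List String :=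
  ("- **Pattern**: " ++ pvGet item "pattern" "") ::
    (if pvGet item "potential_value" "" ≠ ""
     then ["  **Potential Value**: " ++ pvGet item "potential_value" ""] else [])

def pvTypes (residue : List (List (String × String))) : List String :=
  PySem.Set.update [] (residue.map pvKey)

def pvBl (residue : List (List (String × String))) (t : String) : List String :=
  pvHeader t :: (residue.filter (fun i => pvKey i == t)).flatMap pvItemLines

-- ---- generic string/join lemmas ----

theorem pv_join_singleton (sep a : String) : PySem.Str.join sep [a] = a := by
  apply String.toList_inj.mp
  simp [PySem.Str.toList_join, PySem.Chars.join_singleton]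

theorem pv_join_cons (sep a : String) (l : List String) (h : l ≠ []) :
    PySem.Str.join sep (a :: l) = a ++ sep ++ PySem.Str.join sep l := by
  cases l with
  | nil => exact absurd rfl h
  | cons b bs =>
    apply String.toList_inj.mp
    simp [PySem.Str.toList_join, PySem.Chars.join_cons_cons]

theorem pv_join_append (sep : String) (l1 l2 : List String) (h1 : l1 ≠ []) (h2 : l2 ≠ []) :
    PySem.Str.join sep (l1 ++ l2) = PySem.Str.join sep l1 ++ sep ++ PySem.Str.join sep l2 := by
  induction l1 with
  | nil => exact absurd rfl h1
  | cons a l1' ih =>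
    by_cases h : l1' = []
    · subst h
      simp only [List.cons_append, List.nil_append]
      rw [pv_join_cons sep a l2 h2, pv_join_singleton]
    · rw [List.cons_append, pv_join_cons sep a (l1' ++ l2) (by simp [h]),
        pv_join_cons sep a l1' h, ih h]
      simp [String.append_assoc]

theorem pv_join_flatMap (sep : String) (f : (List (String × String)) → List String)
    (l : List (List (String × String))) (hf : ∀ x ∈ l, f x ≠ []) :
    PySem.Str.join sep (l.flatMap f)
      = PySem.Str.join sep (l.map (fun x => PySem.Str.join sep (f x))) := by
  induction l with
  | nil => rfl
  | cons a l' ih =>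
    by_cases h : l' = []
    · subst h
      simp only [List.flatMap_cons, List.flatMap_nil, List.append_nil, List.map_cons,
        List.map_nil]
      rw [pv_join_singleton]
    · have hfa : f a ≠ [] := hf a (by simp)
      have hfl : l'.flatMap f ≠ [] := by
        cases l' with
        | nil => exact absurd rfl h
        | cons b bs =>
          have : f b ≠ [] := hf b (by simp)
          simp only [List.flatMap_cons, ne_eq, List.append_eq_nil_iff, not_and]
          intro hb; exact absurd hb this
      rw [List.flatMap_cons, pv_join_append sep _ _ hfa hfl,
        ih (fun x hx => hf x (by simp [hx])), List.map_cons,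
        pv_join_cons sep _ _ (by simp [h])]

theorem pv_join_cons_flatMap (h0 : String) (f : (List (String × String)) → List String)
    (l : List (List (String × String))) (hf : ∀ x ∈ l, f x ≠ []) :
    PySem.Str.join "\n" (h0 :: l.flatMap f)
      = PySem.Str.join "\n" (h0 :: l.map (fun x => PySem.Str.join "\n" (f x))) := by
  by_cases h : l = []
  · subst h; rfl
  · have hfl : l.flatMap f ≠ [] := by
      cases l with
      | nil => exact absurd rfl h
      | cons b bs =>
        have : f b ≠ [] := hf b (by simp)
        simp only [List.flatMap_cons, ne_eq, List.append_eq_nil_iff, not_and]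
        intro hb; exact absurd hb this
    rw [pv_join_cons _ _ _ hfl, pv_join_flatMap _ _ _ hf,
      pv_join_cons _ _ _ (by simp [h])]

theorem pv_nl_nl : ("\n" : String) ++ "\n" = "\n\n" := by decide

theorem pv_append_empty (s : String) : s ++ "" = s := by
  apply String.toList_inj.mp; simp

-- the block-assembly identity: flat line list with trailing "" per group, joined by
-- "\n", equals the per-group block strings joined by "\n\n" plus a trailing "\n"
theorem pv_assemble (bl : String → List String) (ts : List String)
    (hbl : ∀ t, bl t ≠ []) (hts : ts ≠ []) :
    PySem.Str.join "\n" (ts.flatMap (fun t => bl t ++ [""]))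
      = PySem.Str.join "\n\n" (ts.map (fun t => PySem.Str.join "\n" (bl t))) ++ "\n" := by
  induction ts with
  | nil => exact absurd rfl hts
  | cons t ts' ih =>
    have hgrp : PySem.Str.join "\n" (bl t ++ [""]) = PySem.Str.join "\n" (bl t) ++ "\n" := by
      rw [pv_join_append "\n" (bl t) [""] (hbl t) (by simp), pv_join_singleton,
        String.append_assoc, pv_append_empty]
    by_cases h : ts' = []
    · subst h
      simp only [List.flatMap_cons, List.flatMap_nil, List.append_nil, List.map_cons,
        List.map_nil]
      rw [hgrp, pv_join_singleton]
    · have hfl : ts'.flatMap (fun t => bl t ++ [""]) ≠ [] := by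
        cases ts' with
        | nil => exact absurd rfl h
        | cons b bs =>
          simp only [List.flatMap_cons, ne_eq, List.append_eq_nil_iff, not_and]
          intro hb; exact absurd hb (by simp [hbl b])
      rw [List.flatMap_cons, pv_join_append "\n" _ _ (by simp [hbl t]) hfl, hgrp,
        ih h, List.map_cons, pv_join_cons "\n\n" _ _ (by simp [h])]
      rw [String.append_assoc, String.append_assoc, String.append_assoc,
        String.append_assoc, ← pv_nl_nl]
      rw [String.append_assoc]

-- ---- A-side: reduce A to a flatMap over the ordered distinct types ----

theorem pv_step_eq (d : PySem.Dict String (List (List (String × String))))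
    (item : List (String × String)) :
    (let t := pvKey item
     let d' := if d.contains t then d else d.insert t []
     d'.modify t [] (fun l => l ++ [item]))
    = d.modify (pvKey item) [] (fun l => l ++ [item]) := by
  by_cases h : d.contains (pvKey item)
  · simp [h]
  · have h' : d.contains (pvKey item) = false := by simpa using h
    simp [h', PySem.Dict.modify, PySem.Dict.getD_insert_self, PySem.Dict.insert_insert_self,
      PySem.Dict.getD_of_not_contains _ _ h']

theorem pv_grouped_eq (residue : List (List (String × String))) :
    residue.foldl
      (fun (d : PySem.Dict String (List (List (String × String)))) item =>
        let t := pvKey item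
        let d := if d.contains t then d else d.insert t []
        d.modify t [] (fun l => l ++ [item]))
      PySem.Dict.empty
    = residue.foldl (fun d item => d.modify (pvKey item) [] (fun l => l ++ [item]))
        PySem.Dict.empty := by
  have : (fun (d : PySem.Dict String (List (List (String × String)))) item =>
      let t := pvKey item
      let d := if d.contains t then d else d.insert t []
      d.modify t [] (fun l => l ++ [item]))
      = fun d item => d.modify (pvKey item) [] (fun l => l ++ [item]) := by
    funext d item; exact pv_step_eq d item
  rw [this]

theorem pv_getD_grouped (residue : List (List (String × String))) (c : String) :
    (residue.foldl (fun d item => d.modify (pvKey item) [] (fun l => l ++ [item]))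
        PySem.Dict.empty).getD c []
    = residue.filter (fun item => pvKey item == c) := by
  have h : residue.foldl (fun d item => d.modify (pvKey item) [] (fun l => l ++ [item]))
      PySem.Dict.empty
      = (residue.map (fun item => (pvKey item, item))).foldl
          (fun d p => d.modify p.1 [] (fun l => l ++ [p.2])) PySem.Dict.empty := by
    rw [List.foldl_map]
  rw [h, PySem.Dict.getD_foldl_modify_append]
  simp [List.filter_map, Function.comp_def]

theorem pv_keys_grouped (residue : List (List (String × String))) :
    (residue.foldl (fun d item => d.modify (pvKey item) [] (fun l => l ++ [item]))
        PySem.Dict.empty).keys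
    = PySem.Set.update [] (residue.map pvKey) := by
  have := PySem.Dict.keys_foldl_modify_key residue pvKey []
      (fun _ item => (fun l => l ++ [item])) (PySem.Dict.empty)
  simpa [PySem.Dict.keys_empty] using this

theorem pv_nodup_keys (residue : List (List (String × String))) :
    (residue.foldl (fun d item => d.modify (pvKey item) [] (fun l => l ++ [item]))
        PySem.Dict.empty).keys.Nodup := by
  exact PySem.Dict.nodup_keys_foldl_modify_key residue pvKey []
    (fun _ item => (fun l => l ++ [item])) PySem.Dict.empty (by simp [PySem.Dict.keys_empty])

theorem pv_emit_eq (acc : List String) (item : List (String × String)) :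
    pvEmit acc item = acc ++ pvItemLines item := by
  unfold pvEmit pvItemLines
  by_cases h : pvGet item "potential_value" "" ≠ "" <;> simp [h]

theorem pv_foldl_emit (items : List (List (String × String))) (acc : List String) :
    items.foldl pvEmit acc = acc ++ items.flatMap pvItemLines := by
  induction items generalizing acc with
  | nil => simp
  | cons x xs ih => rw [List.foldl_cons, pv_emit_eq, ih, List.flatMap_cons, List.append_assoc]

theorem pv_foldl_append {α : Type} (g : α → List String) (l : List α) (init : List String) :
    l.foldl (fun acc t => acc ++ g t) init = init ++ l.flatMap g := by
  induction l generalizing init with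
  | nil => simp
  | cons x xs ih => rw [List.foldl_cons, ih, List.flatMap_cons, List.append_assoc]

theorem pv_A_norm (residue : List (List (String × String))) (h : residue ≠ []) :
    format_residue_py residue
      = PySem.Str.join "\n" ((pvTypes residue).flatMap (fun t => pvBl residue t ++ [""])) := by
  unfold format_residue_py
  rw [if_neg h]
  simp only []
  rw [pv_grouped_eq]
  have hitems : (residue.foldl
      (fun d item => d.modify (pvKey item) [] (fun l => l ++ [item]))
      PySem.Dict.empty).items
      = (pvTypes residue).map
          (fun t => (t, residue.filter (fun item => pvKey item == t))) := by
    rw [PySem.Dict.items_eq_map_keys _ (pv_nodup_keys residue) []]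
    rw [pv_keys_grouped]
    exact List.map_congr_left (fun t _ => by rw [pv_getD_grouped])
  rw [hitems, List.foldl_map]
  congr 1
  have hbody : (fun (acc : List String) t =>
      (((residue.filter (fun item => pvKey item == t)).foldl pvEmit
        (acc ++ ["### " ++ pvTitle t ++ " Patterns"])) ++ [""]))
      = fun acc t => acc ++ (pvBl residue t ++ [""]) := by
    funext acc t
    rw [pv_foldl_emit]
    simp [pvBl, pvHeader, List.append_assoc]
  calc ((pvTypes residue).foldl
        (fun (acc : List String) t =>
          let acc := acc ++ ["### " ++ pvTitle t ++ " Patterns"]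
          let acc := (residue.filter (fun item => pvKey item == t)).foldl pvEmit acc
          acc ++ [""]) [])
      = (pvTypes residue).foldl (fun acc t => acc ++ (pvBl residue t ++ [""])) [] := by
        rw [← hbody]
    _ = (pvTypes residue).flatMap (fun t => pvBl residue t ++ [""]) := by
        rw [pv_foldl_append]; simp

-- ---- B-side: characterise the peel-off recursion ----

theorem pv_update_cons (ys : List String) : ∀ (a : String) (s : List String),
    PySem.Set.update (a :: s) ys
      = a :: PySem.Set.update s (ys.filter (fun y => y != a)) := by
  induction ys with
  | nil => intro a s; simp [PySem.Set.update]
  | cons y ys ih =>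
    intro a s
    by_cases hya : y = a
    · subst hya
      simp only [List.filter_cons, bne_self_eq_false]
      have hadd : PySem.Set.add (y :: s) y = y :: s := by
        simp [PySem.Set.add, PySem.Set.contains]
      simp only [PySem.Set.update, List.foldl_cons, hadd]
      exact ih y s
    · have hfil : (y :: ys).filter (fun z => z != a) = y :: ys.filter (fun z => z != a) := by
        simp [hya]
      rw [hfil]
      by_cases hys : y ∈ s
      · have h1 : PySem.Set.add (a :: s) y = a :: s := by
          simp [PySem.Set.add, PySem.Set.contains, hys]
        have h2 : PySem.Set.add s y = s := by
          simp [PySem.Set.add, PySem.Set.contains, hys]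
        simp only [PySem.Set.update, List.foldl_cons, h1, h2]
        exact ih a s
      · have h1 : PySem.Set.add (a :: s) y = a :: (s ++ [y]) := by
          simp [PySem.Set.add, PySem.Set.contains, hys, hya]
        have h2 : PySem.Set.add s y = s ++ [y] := by
          simp [PySem.Set.add, PySem.Set.contains, hys]
        simp only [PySem.Set.update, List.foldl_cons, h1, h2]
        exact ih a (s ++ [y])

theorem pv_blocks_eq : ∀ (rest : List (List (String × String))),
    pvBlocks rest
      = (pvTypes rest).map (fun t =>
          PySem.Str.join "\n"
            (pvHeader t :: (rest.filter (fun i => pvKey i == t)).map pvFmt)) := by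
  intro rest
  induction rest using pvBlocks.induct with
  | case1 =>
    rw [pvBlocks]
    simp [pvTypes, PySem.Set.update]
  | case2 x xs t rest' ih =>
    rw [pvBlocks]
    have hrest' : rest' = xs.filter (fun i => pvKey i != t) := by
      simp [rest', t]
    have htypes : pvTypes (x :: xs) = t :: pvTypes rest' := by
      show PySem.Set.update [] (pvKey x :: xs.map pvKey) = _
      have h0 : PySem.Set.update [] (pvKey x :: xs.map pvKey)
          = PySem.Set.update [pvKey x] (xs.map pvKey) := by
        simp [PySem.Set.update, PySem.Set.add, PySem.Set.contains]
      rw [h0, pv_update_cons]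
      have : (xs.map pvKey).filter (fun y => y != pvKey x)
          = (xs.filter (fun i => pvKey i != pvKey x)).map pvKey := by
        rw [List.filter_map]; rfl
      rw [this, ← hrest']
      rfl
    rw [htypes, List.map_cons]
    congr 1
    have hB : pvBlocks (List.filter (fun i => pvKey i != pvKey x) (x :: xs))
        = (pvTypes rest').map (fun t =>
            PySem.Str.join "\n" (pvHeader t :: (rest'.filter (fun i => pvKey i == t)).map pvFmt)) := ih
    rw [hB]
    apply List.map_congr_left
    intro t' ht'
    have ht'mem : t' ∈ rest'.map pvKey := by
      have hsub : ∀ (zs s : List String), t' ∈ PySem.Set.update s zs → t' ∈ s ∨ t' ∈ zs := by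
        intro zs
        induction zs with
        | nil => intro s hs; exact Or.inl (by simpa [PySem.Set.update] using hs)
        | cons z zs ihz =>
          intro s hs
          have hs' : t' ∈ PySem.Set.update (PySem.Set.add s z) zs := hs
          rcases ihz _ hs' with hin | hin
          · by_cases hz : z ∈ s
            · have hAdd : PySem.Set.add s z = s := by
                simp [PySem.Set.add, PySem.Set.contains, hz]
              rw [hAdd] at hin; exact Or.inl hin
            · have hAdd : PySem.Set.add s z = s ++ [z] := by
                simp [PySem.Set.add, PySem.Set.contains, hz]
              rw [hAdd] at hin
              rcases List.mem_append.mp hin with hmem | hmem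
              · exact Or.inl hmem
              · simp only [List.mem_singleton] at hmem
                exact Or.inr (by simp [hmem])
          · exact Or.inr (List.mem_cons_of_mem _ hin)
      rcases hsub (rest'.map pvKey) [] ht' with hin | hin
      · simp at hin
      · exact hin
    obtain ⟨i, hi, hik⟩ := List.exists_of_mem_map ht'mem
    have hit : pvKey i != t := by
      rw [hrest'] at hi
      exact (List.mem_filter.mp hi).2
    have ht'ne : t' ≠ t := by
      intro hEq; rw [hik, hEq] at hit; simp at hit
    -- filters agree: x has key t ≠ t', and rest' only drops key-t items
    have hx : (pvKey x == t') = false := by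
      simp [t] at ht'ne ⊢
      exact fun hEq => ht'ne hEq.symm
    have hfilters : rest'.filter (fun i => pvKey i == t')
        = (x :: xs).filter (fun i => pvKey i == t') := by
      rw [hrest', List.filter_cons]
      simp only [hx]
      rw [List.filter_filter]
      apply List.filter_congr
      intro i' _
      by_cases hk : pvKey i' = t'
      · simp [hk, bne]
        exact ht'ne
      · simp [hk]
    rw [hfilters]

theorem pv_fmt_eq (item : List (String × String)) :
    pvFmt item = PySem.Str.join "\n" (pvItemLines item) := by
  unfold pvFmt pvItemLines
  by_cases h : pvGet item "potential_value" "" ≠ ""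
  · rw [if_pos h, if_pos h, pv_join_cons _ _ _ (by simp), pv_join_singleton]
    apply String.toList_inj.mp
    have hlit : ("\n  **Potential Value**: " : String).toList
        = '\n' :: ("  **Potential Value**: " : String).toList := by decide
    have hnl : ("\n" : String).toList = ['\n'] := by decide
    simp [hlit, hnl]
  · rw [if_neg h, if_neg h, pv_join_singleton]

theorem pv_itemLines_ne_nil (item : List (String × String)) : pvItemLines item ≠ [] := by
  unfold pvItemLines; simp

theorem pv_block_str (residue : List (List (String × String))) (t : String) :
    PySem.Str.join "\n"
        (pvHeader t :: (residue.filter (fun i => pvKey i == t)).map pvFmt)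
      = PySem.Str.join "\n" (pvBl residue t) := by
  unfold pvBl
  rw [pv_join_cons_flatMap _ _ _ (fun x _ => pv_itemLines_ne_nil x)]
  congr 2
  apply List.map_congr_left
  intro i _
  rw [pv_fmt_eq]

theorem pv_types_ne_nil (x : List (String × String)) (xs : List (List (String × String))) :
    pvTypes (x :: xs) ≠ [] := by
  show PySem.Set.update [] (pvKey x :: xs.map pvKey) ≠ []
  have : PySem.Set.update [] (pvKey x :: xs.map pvKey)
      = PySem.Set.update [pvKey x] (xs.map pvKey) := by
    simp [PySem.Set.update, PySem.Set.add, PySem.Set.contains]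
  rw [this, pv_update_cons]
  simp

theorem pv_bl_ne_nil (residue : List (List (String × String))) (t : String) :
    pvBl residue t ≠ [] := by
  unfold pvBl; simp

-- ===== VERDICT (by name: the statement is the Claim_ definition above) =====
theorem format_residue_py_spec : Claim_equal_format_residue_py := by
  intro residue _
  unfold Spec_format_residue_py format_residue_py_alt
  cases residue with
  | nil => rfl
  | cons x xs =>
    rw [if_neg (by simp), pv_A_norm _ (by simp), pv_blocks_eq]
    rw [pv_assemble (pvBl (x :: xs)) (pvTypes (x :: xs)) (pv_bl_ne_nil _)
      (pv_types_ne_nil x xs)]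
    congr 1
    congr 1
    apply List.map_congr_left
    intro t _
    exact (pv_block_str (x :: xs) t).symm
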